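-- pv_equiv track=rewrite | github.com/wiztigers/war-careers | wh.py | profile2str
-- ===== SOURCE A (Python) =====
-- def profile2str(profile):
-- 	res = ''
-- 	for k in profile.keys():
-- 		res += '|{:3}'.format(k)
-- 	res += '|\n---------------------------------------------\n|'
-- 	for v in profile.values():
-- 		res += ' {:<2}|'.format(v)
-- 	return res
-- ===== SOURCE B (Python) =====
-- def profile2str(profile):
--     header = ''
--     data = ''
--     for k, v in profile.items():
--         header += '|' + k.ljust(3)
--         data += ' ' + str(v).ljust(2) + '|'
--     return header + '|\n---------------------------------------------\n|' + data
-- ===== Notes on version B (the rewrite author's own statement) =====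
-- stated objective: alternative
-- what changed: Replaces A's two sequential scans (keys then values) and repeated '|{:3}'/' {:<2}|' format calls by a single pass over items() maintaining two accumulator strings (header and data rows, built with ljust), assembled once at the end.
import Mathlib
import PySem

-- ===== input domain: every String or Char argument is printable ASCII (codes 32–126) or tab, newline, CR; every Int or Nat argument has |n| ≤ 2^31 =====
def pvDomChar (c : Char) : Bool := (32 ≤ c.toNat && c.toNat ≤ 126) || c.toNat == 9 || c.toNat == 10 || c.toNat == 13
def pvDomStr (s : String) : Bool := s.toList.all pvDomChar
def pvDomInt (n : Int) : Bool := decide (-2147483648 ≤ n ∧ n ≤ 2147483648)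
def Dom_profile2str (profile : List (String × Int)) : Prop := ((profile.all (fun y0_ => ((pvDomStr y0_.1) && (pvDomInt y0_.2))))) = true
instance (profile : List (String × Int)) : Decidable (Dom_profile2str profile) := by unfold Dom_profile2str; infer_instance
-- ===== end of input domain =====

-- B merges A's two sequential scans (keys, then values) into one pass over the items
-- maintaining two accumulators; objective: alternative decomposition, same cost.

-- left-justify to width w with spaces (Python str.ljust / '{:w}' on a str argument); exact for any string
def pvLjust (s : String) (w : Nat) : String :=
  s ++ String.ofList (List.replicate (w - s.toList.length) ' ')

-- ===== PORT A =====
def profile2str (profile : List (String × Int)) : String :=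
  let res : String := ""
  let res := profile.foldl (fun res k => res ++ "|" ++ pvLjust k.1 3) res
  let res := res ++ "|\n---------------------------------------------\n|"
  let res := profile.foldl (fun res v => res ++ " " ++ pvLjust (PySem.Int.toStr v.2) 2 ++ "|") res
  res

-- ===== PORT B =====
def profile2str_alt (profile : List (String × Int)) : String :=
  let hd : String × String :=
    profile.foldl
      (fun hd kv =>
        (hd.1 ++ "|" ++ pvLjust kv.1 3,
         hd.2 ++ " " ++ pvLjust (PySem.Int.toStr kv.2) 2 ++ "|"))
      ("", "")
  hd.1 ++ "|\n---------------------------------------------\n|" ++ hd.2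

-- ===== PRECONDITION & SPEC =====
def Spec_profile2str (profile : List (String × Int)) (out : String) : Prop := out = profile2str_alt profile
instance (profile : List (String × Int)) (out : String) : Decidable (Spec_profile2str profile out) := by unfold Spec_profile2str; infer_instance

-- ===== CLAIM (what is proved, stated in full; the proofs are below) =====
def Claim_equal_profile2str : Prop := ∀ (profile : List (String × Int)), Dom_profile2str profile → Spec_profile2str profile (profile2str profile)

-- ===== LEMMAS AND PROOFS =====

theorem foldA2_shift (l : List (String × Int)) (a : String) :
    l.foldl (fun res v => res ++ " " ++ pvLjust (PySem.Int.toStr v.2) 2 ++ "|") a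
      = a ++ l.foldl (fun res v => res ++ " " ++ pvLjust (PySem.Int.toStr v.2) 2 ++ "|") "" := by
  induction l generalizing a with
  | nil => simp
  | cons x xs ih =>
      simp only [List.foldl_cons]
      rw [ih, ih ("" ++ " " ++ pvLjust (PySem.Int.toStr x.2) 2 ++ "|")]
      simp [String.append_assoc]

theorem foldB_eq (l : List (String × Int)) :
    l.foldl
      (fun (hd : String × String) kv =>
        (hd.1 ++ "|" ++ pvLjust kv.1 3,
         hd.2 ++ " " ++ pvLjust (PySem.Int.toStr kv.2) 2 ++ "|"))
      ("", "")
    = (l.foldl (fun res k => res ++ "|" ++ pvLjust k.1 3) "",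
       l.foldl (fun res v => res ++ " " ++ pvLjust (PySem.Int.toStr v.2) 2 ++ "|") "") := by
  suffices h : ∀ (a b : String),
      l.foldl
        (fun (hd : String × String) kv =>
          (hd.1 ++ "|" ++ pvLjust kv.1 3,
           hd.2 ++ " " ++ pvLjust (PySem.Int.toStr kv.2) 2 ++ "|"))
        (a, b)
      = (l.foldl (fun res k => res ++ "|" ++ pvLjust k.1 3) a,
         l.foldl (fun res v => res ++ " " ++ pvLjust (PySem.Int.toStr v.2) 2 ++ "|") b) by
    exact h "" ""
  induction l with
  | nil => intro a b; simp
  | cons x xs ih => intro a b; simp only [List.foldl_cons]; exact ih _ _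

-- ===== VERDICT (by name: the statement is the Claim_ definition above) =====
theorem profile2str_spec : Claim_equal_profile2str := by
  intro profile _
  unfold Spec_profile2str profile2str profile2str_alt
  simp only [foldB_eq]
  rw [foldA2_shift]
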